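-- pv_equiv track=rewrite | github.com/joshuachang2311/MUS-105-notes | hw0/hw0.py | remove_substring_instances
-- ===== SOURCE A (Python) =====
-- def remove_substring_instances(in_str, substr):
--     """
--     given the string input, find all instances of substr and remove them from the input. Then, return the number of
--     instances of substr that were removed, as well as the new string with all instances of substr removed, as a tuple.
--     for example:
--         return num_instances, new_string
--
--     :param in_str: string to clean up
--     :type in_str: str
--     :param substr: substring to find and remove
--     :type substr: str
--     :return: a tuple where the first element is the number of elements removed, and the second is the string after
--         cleaning
--     :rtype: tuple
--     """
--     # replace the line below with your code
--
--     in_str_length = len(in_str)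
--     substr_length = len(substr)
--     num_instances = 0
--     to_return = ""
--
--     i = 0
--
--     while i < in_str_length:
--         if (i + substr_length) > in_str_length:
--             to_return += in_str[i]
--             i += 1
--
--             continue
--
--         flag = True
--
--         for j in range(0, substr_length):
--             if in_str[i + j] != substr[j]:
--                 flag = False
--                 break
--
--         if flag == True:
--             i += substr_length
--             num_instances += 1
--         else:
--             to_return += in_str[i]
--             i += 1
--
--     return num_instances, to_return
-- ===== SOURCE B (Python) =====
-- def remove_substring_instances(in_str, substr):
--     count = 0
--     start = 0
--     parts = []
--     while True:
--         pos = in_str.find(substr, start)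
--         if pos == -1:
--             parts.append(in_str[start:])
--             break
--         parts.append(in_str[start:pos])
--         count += 1
--         start = pos + len(substr)
--     return count, "".join(parts)
-- ===== Notes on version B (the rewrite author's own statement) =====
-- stated objective: faster
-- what changed: B replaces A's per-position character-comparison loop that appends one kept character at a time with a find-driven single pass that jumps from match to match, collecting the gap slices between matches and joining them once; Pre_ excludes empty substr, on which both implementations loop forever (A for nonempty in_str, B always).
-- outside the precondition, e.g. on remove_substring_instances('', ''): A returns (0, ''), B does not finish within the time limit
import Mathlib
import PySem

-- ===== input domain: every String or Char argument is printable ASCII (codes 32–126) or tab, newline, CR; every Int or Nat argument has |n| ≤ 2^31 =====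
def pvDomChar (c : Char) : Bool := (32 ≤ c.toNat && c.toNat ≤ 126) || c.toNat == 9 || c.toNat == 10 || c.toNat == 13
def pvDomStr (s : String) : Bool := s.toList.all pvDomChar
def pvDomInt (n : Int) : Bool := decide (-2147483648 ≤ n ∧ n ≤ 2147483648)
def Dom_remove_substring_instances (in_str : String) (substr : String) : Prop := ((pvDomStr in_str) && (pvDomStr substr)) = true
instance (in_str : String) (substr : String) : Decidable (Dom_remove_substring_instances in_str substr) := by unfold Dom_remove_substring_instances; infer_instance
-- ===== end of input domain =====

-- B replaces A's per-position character loop (append one kept char at a time) with a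
-- find-driven pass collecting the gap slices between matches, joined once (objective: faster, constant-factor).

-- ===== PORT A =====
-- inner 'for j in range(0, substr_length)' with break: compares chars one by one
def pvInnerA (s sub : List Char) (i j : Nat) : Bool :=
  if j < sub.length then
    if s.getD (i + j) ' ' ≠ sub.getD j ' ' then false
    else pvInnerA s sub i (j + 1)
  else true
termination_by sub.length - j

-- A's while loop; fuel only totalizes (substr = '' diverges in Python and is outside Pre_)
def pvLoopA (s sub : List Char) (fuel i : Nat) (cnt : Int) (acc : List Char) : Int × List Char :=
  match fuel with
  | 0 => (cnt, acc)
  | fuel + 1 =>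
    if i < s.length then
      if i + sub.length > s.length then
        pvLoopA s sub fuel (i + 1) cnt (acc ++ [s.getD i ' '])
      else if pvInnerA s sub i 0 then
        pvLoopA s sub fuel (i + sub.length) (cnt + 1) acc
      else
        pvLoopA s sub fuel (i + 1) cnt (acc ++ [s.getD i ' '])
    else (cnt, acc)

def remove_substring_instances (in_str : String) (substr : String) : Int × String :=
  let s := in_str.toList
  let r := pvLoopA s substr.toList (s.length + 1) 0 0 []
  (r.1, String.mk r.2)

-- ===== PORT B =====
-- B's while True loop: pos = in_str.find(substr, start); collect gap slices
def pvLoopB (s sub : List Char) (fuel start : Nat) (cnt : Int) (parts : List (List Char)) :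
    Int × List (List Char) :=
  match fuel with
  | 0 => (cnt, parts)
  | fuel + 1 =>
    let pos := PySem.Chars.findFrom s sub (start : Int) none
    if pos = -1 then (cnt, parts ++ [PySem.List.slice s (some (start : Int)) none])
    else
      pvLoopB s sub fuel (pos.toNat + sub.length) (cnt + 1)
        (parts ++ [PySem.List.slice s (some (start : Int)) (some pos)])

def remove_substring_instances_alt (in_str : String) (substr : String) : Int × String :=
  let s := in_str.toList
  let r := pvLoopB s substr.toList (s.length + 1) 0 0 []
  (r.1, String.mk (PySem.Chars.join [] r.2))

-- ===== PRECONDITION & SPEC =====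
-- Pre_ excludes substr = "": A loops forever on it for nonempty in_str (and B loops forever
-- there even for in_str = "", where A returns (0, '')).
def Pre_remove_substring_instances (in_str : String) (substr : String) : Prop := substr ≠ ""
instance (in_str : String) (substr : String) : Decidable (Pre_remove_substring_instances in_str substr) := by
  unfold Pre_remove_substring_instances; infer_instance

def pvWitness_remove_substring_instances : String × String := ("abcabca", "bc")

def Spec_remove_substring_instances (in_str : String) (substr : String) (out : Int × String) : Prop := out = remove_substring_instances_alt in_str substr
instance (in_str : String) (substr : String) (out : Int × String) : Decidable (Spec_remove_substring_instances in_str substr out) := by unfold Spec_remove_substring_instances; infer_instance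

-- ===== CLAIM (what is proved, stated in full; the proofs are below) =====
def Claim_equal_remove_substring_instances : Prop := ∀ (in_str : String) (substr : String), Dom_remove_substring_instances in_str substr → Pre_remove_substring_instances in_str substr → Spec_remove_substring_instances in_str substr (remove_substring_instances in_str substr)

-- ===== LEMMAS AND PROOFS =====

-- ''.join(parts) is concatenation
lemma join_nil_flatten (ps : List (List Char)) : PySem.Chars.join [] ps = ps.flatten := by
  induction ps with
  | nil => simp [PySem.Chars.join_nil]
  | cons a t ih =>
    cases t with
    | nil => simp [PySem.Chars.join_singleton]
    | cons b u => simp [PySem.Chars.join_cons_cons] at ih ⊢; simp [ih]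

-- pvInnerA from j decides whether all remaining positions agree
lemma pvInnerA_iff (s sub : List Char) (i : Nat) :
    ∀ j, (pvInnerA s sub i j = true ↔
      ∀ k, j ≤ k → k < sub.length → s.getD (i + k) ' ' = sub.getD k ' ') := by
  intro j
  induction' hn : sub.length - j using Nat.strong_induction_on with n IH generalizing j
  subst hn
  rw [pvInnerA]
  split_ifs with hj hne
  · simp only [Bool.false_eq_true, false_iff]
    push_neg
    exact ⟨j, le_refl j, hj, hne⟩
  · push_neg at hne
    rw [IH (sub.length - (j+1)) (by omega) (j+1) rfl]
    constructor
    · intro h k hk1 hk2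
      rcases Nat.eq_or_lt_of_le hk1 with rfl | h'
      · exact hne
      · exact h k h' hk2
    · intro h k hk1 hk2; exact h k (by omega) hk2
  · simp only [true_iff]; intro k hk1 hk2; omega

-- at position i with room, pvInnerA decides the prefix test
lemma pvInnerA_prefix (s sub : List Char) (i : Nat) (h : i + sub.length ≤ s.length) :
    (pvInnerA s sub i 0 = true) ↔ sub <+: s.drop i := by
  rw [pvInnerA_iff, List.prefix_iff_eq_take]
  have hlen : sub.length ≤ (s.drop i).length := by simp; omega
  constructor
  · intro hall
    apply List.ext_getElem (by simp; omega)
    intro k hk1 hk2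
    have hk : k < sub.length := hk1
    have := hall k (Nat.zero_le k) hk
    simp only [List.getD_eq_getElem?_getD] at this
    rw [List.getElem?_eq_getElem (by omega), List.getElem?_eq_getElem (by omega)] at this
    simpa [List.getElem_take, List.getElem_drop] using this.symm
  · intro heq k _ hk
    have h2 : sub[k]? = s[i+k]? := by
      rw [heq, List.getElem?_take_of_lt hk, List.getElem?_drop]
    simp [List.getD_eq_getElem?_getD, h2]

-- a prefix of s.drop j with start ≤ j is an infix of s.drop start
lemma prefix_drop_infix (s sub : List Char) (start j : Nat) (hj : start ≤ j)
    (h : sub <+: s.drop j) : sub <:+: s.drop start := by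
  have hdj : s.drop j = (s.drop start).drop (j - start) := by
    rw [List.drop_drop]; congr 1; omega
  exact (h.isInfix).trans (hdj ▸ (List.drop_suffix _ _).isInfix)

-- pvLoopA walks char-by-char across a match-free region [i, p)
lemma pvLoopA_skip (s sub : List Char) (p : Nat) (hp : p ≤ s.length) :
    ∀ i fuel cnt acc, i ≤ p → p - i ≤ fuel →
    (∀ j, i ≤ j → j < p → ¬ sub <+: s.drop j) →
    pvLoopA s sub fuel i cnt acc
      = pvLoopA s sub (fuel - (p - i)) p cnt (acc ++ (s.drop i).take (p - i)) := by
  intro i fuel cnt acc hip hfuel hnomatch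
  induction' hd : p - i with d IH generalizing i fuel acc
  · have : i = p := by omega
    subst this; simp
  · have hip' : i < p := by omega
    have hil : i < s.length := by omega
    obtain ⟨fuel', rfl⟩ : ∃ f', fuel = f' + 1 := ⟨fuel - 1, by omega⟩
    have hgetd : s.getD i ' ' = s[i] := by
      simp [List.getD_eq_getElem?_getD, List.getElem?_eq_getElem hil]
    have hdrop : s.drop i = s[i] :: s.drop (i + 1) :=
      List.drop_eq_getElem_cons hil
    have hstep : pvLoopA s sub (fuel' + 1) i cnt acc =
        pvLoopA s sub fuel' (i + 1) cnt (acc ++ [s.getD i ' ']) := by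
      rw [pvLoopA]
      by_cases h2 : i + sub.length > s.length
      · rw [if_pos hil, if_pos h2]
      · rw [if_pos hil, if_neg h2,
          if_neg (show ¬ (pvInnerA s sub i 0 = true) from fun h3 =>
            absurd ((pvInnerA_prefix s sub i (by omega)).mp h3)
              (hnomatch i (le_refl i) hip'))]
    rw [hstep,
      IH (i+1) fuel' (acc ++ [s.getD i ' ']) (by omega) (by omega)
        (fun j hj1 hj2 => hnomatch j (by omega) hj2) (by omega)]
    congr 1
    · omega
    · rw [List.append_assoc, hgetd]
      congr 1
      rw [hdrop, List.take_succ_cons]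
      simp

-- pvLoopA at the right end returns immediately (any fuel)
lemma pvLoopA_end (s sub : List Char) (fuel : Nat) (cnt : Int) (acc : List Char) :
    pvLoopA s sub fuel s.length cnt acc = (cnt, acc) := by
  cases fuel with
  | zero => rfl
  | succ f => rw [pvLoopA]; simp

-- main simulation: pvLoopA equals the flattened pvLoopB from any common position
lemma pvLoop_main (s sub : List Char) (hsub : sub ≠ []) :
    ∀ n start cnt acc parts fuelA fuelB,
      s.length - start ≤ n → start ≤ s.length →
      s.length - start < fuelA → s.length - start < fuelB →
      acc = PySem.Chars.join [] parts →
      pvLoopA s sub fuelA start cnt acc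
        = ((pvLoopB s sub fuelB start cnt parts).1,
           PySem.Chars.join [] (pvLoopB s sub fuelB start cnt parts).2) := by
  intro n
  induction' n using Nat.strong_induction_on with n IH
  intro start cnt acc parts fuelA fuelB hn hstart hfA hfB hacc
  have hm : 0 < sub.length := List.length_pos_iff.mpr hsub
  obtain ⟨fB', rfl⟩ : ∃ f', fuelB = f' + 1 := ⟨fuelB - 1, by omega⟩
  rw [pvLoopB]
  simp only [PySem.Chars.findFrom_natCast s sub start hstart]
  by_cases hfind : PySem.Chars.find (s.drop start) sub = -1
  · -- no further match: A walks to the end appending everything that is left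
    simp only [hfind, if_pos rfl]
    have hnomatch : ∀ j, start ≤ j → j < s.length → ¬ sub <+: s.drop j := by
      intro j hj1 _ hpre
      exact (PySem.Chars.find_eq_neg_one_iff (s.drop start) sub).mp hfind
        (prefix_drop_infix s sub start j hj1 hpre)
    rw [pvLoopA_skip s sub s.length (le_refl _) start fuelA cnt acc hstart (by omega)
        (fun j h1 h2 => hnomatch j h1 h2),
      pvLoopA_end]
    have htake : (s.drop start).take (s.length - start) = s.drop start := by
      apply List.take_of_length_le; simp
    rw [htake, hacc]
    simp [join_nil_flatten, PySem.List.slice_from_natCast]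
  · -- a match exists: A walks to it, consumes it, and both recurse from p + sub.length
    set f := PySem.Chars.find (s.drop start) sub with hf
    have hfge : 0 ≤ f := by
      have := PySem.Chars.neg_one_le_find (s.drop start) sub
      omega
    obtain ⟨hpre, hmin⟩ := PySem.Chars.find_spec hfge
    set p : Nat := start + f.toNat with hp
    have hpdrop : (s.drop start).drop f.toNat = s.drop p := by
      rw [List.drop_drop]
    rw [hpdrop] at hpre
    have hflen : f ≤ (s.drop start).length := PySem.Chars.find_le_length (s.drop start) sub
    have hplen : p + sub.length ≤ s.length := by
      have := hpre.length_le
      simp at this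
      omega
    have hposcast : (start : Int) + f = ((p : Nat) : Int) := by
      simp [hp]; omega
    have htonat : ((start : Int) + f).toNat = p := by omega
    rw [if_neg hfind, if_neg (show ¬ ((start : Int) + f = -1) by omega)]
    have hnomatch : ∀ j, start ≤ j → j < p → ¬ sub <+: s.drop j := by
      intro j hj1 hj2 hcon
      apply hmin (j - start) (by omega)
      rw [List.drop_drop]
      have hjj : start + (j - start) = j := by omega
      rw [hjj]
      exact hcon
    rw [pvLoopA_skip s sub p (by omega) start fuelA cnt acc (by omega) (by omega) hnomatch]
    obtain ⟨fA', hfA'⟩ : ∃ f', fuelA - (p - start) = f' + 1 := ⟨fuelA - (p - start) - 1, by omega⟩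
    rw [hfA', pvLoopA]
    have hplt : p < s.length := by omega
    rw [if_pos hplt, if_neg (by omega), if_pos ((pvInnerA_prefix s sub p hplen).mpr hpre)]
    have hslice : PySem.List.slice s (some (start : Int)) (some ((start : Int) + f))
        = (s.drop start).take (p - start) := by
      rw [hposcast, PySem.List.slice_natCast]
    rw [htonat, hslice]
    exact IH (s.length - (p + sub.length)) (by omega) (p + sub.length) (cnt + 1)
      (acc ++ (s.drop start).take (p - start))
      (parts ++ [(s.drop start).take (p - start)]) fA' fB'
      (le_refl _) (by omega) (by omega) (by omega)
      (by rw [hacc]; simp [join_nil_flatten])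

-- ===== VERDICT (by name: the statement is the Claim_ definition above) =====
theorem remove_substring_instances_spec : Claim_equal_remove_substring_instances := by
  intro in_str substr _ hpre
  unfold Spec_remove_substring_instances remove_substring_instances remove_substring_instances_alt
  have hsub : substr.toList ≠ [] := by
    intro h
    exact hpre (String.toList_inj.mp h)
  have := pvLoop_main in_str.toList substr.toList hsub in_str.toList.length 0 0 [] []
    (in_str.toList.length + 1) (in_str.toList.length + 1)
    (by omega) (by omega) (by omega) (by omega) (by simp [join_nil_flatten])
  simp only [this]
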